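-- pv_equiv track=rewrite | github.com/arkaitzsisniega/arkaitz-2526 | src/marcar_lesion.py | _idx_col
-- ===== SOURCE A (Python) =====
-- def _idx_col(cabecera: list[str], nombres: list[str]) -> int | None:
--     """Devuelve el índice (0-based) de la primera columna cuya cabecera
--     coincida (case-insensitive, sin acentos básicos) con cualquiera de
--     `nombres`. None si no se encuentra."""
--     def norm(s: str) -> str:
--         return (
--             (s or "")
--             .strip()
--             .upper()
--             .replace("Á", "A").replace("É", "E").replace("Í", "I")
--             .replace("Ó", "O").replace("Ú", "U").replace("Ñ", "N")
--         )
--     objetivos = {norm(n) for n in nombres}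
--     for i, c in enumerate(cabecera):
--         if norm(c) in objetivos:
--             return i
--     return None
-- ===== SOURCE B (Python) =====
-- def _idx_col(cabecera: list[str], nombres: list[str]) -> int | None:
--     """Index the normalized headers once (first occurrence wins), then query
--     each name and return the minimum matching column index; None if none match."""
--     def norm(s: str) -> str:
--         return (
--             (s or "")
--             .strip()
--             .upper()
--             .replace("Á", "A").replace("É", "E").replace("Í", "I")
--             .replace("Ó", "O").replace("Ú", "U").replace("Ñ", "N")
--         )
--     first = {}
--     for i, c in enumerate(cabecera):
--         k = norm(c)
--         if k not in first:
--             first[k] = i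
--     best = None
--     for n in nombres:
--         j = first.get(norm(n))
--         if j is not None and (best is None or j < best):
--             best = j
--     return best
-- ===== Notes on version B (the rewrite author's own statement) =====
-- stated objective: alternative
-- what changed: Instead of scanning headers against a set of normalized names, B builds a dict from normalized header to its first column index in one pass, then iterates the names looking each up and returns the minimum found index.
import Mathlib
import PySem

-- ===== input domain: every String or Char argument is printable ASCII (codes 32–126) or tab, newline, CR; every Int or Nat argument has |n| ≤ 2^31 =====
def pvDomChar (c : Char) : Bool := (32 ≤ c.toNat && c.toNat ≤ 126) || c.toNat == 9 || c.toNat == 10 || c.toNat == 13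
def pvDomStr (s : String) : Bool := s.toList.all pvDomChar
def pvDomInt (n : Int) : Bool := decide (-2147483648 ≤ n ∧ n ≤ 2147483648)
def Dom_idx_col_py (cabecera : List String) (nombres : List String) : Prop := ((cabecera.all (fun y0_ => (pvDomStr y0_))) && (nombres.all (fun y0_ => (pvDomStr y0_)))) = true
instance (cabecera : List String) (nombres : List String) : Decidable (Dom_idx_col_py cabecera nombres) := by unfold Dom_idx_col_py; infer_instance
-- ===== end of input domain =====

-- B indexes the normalized headers once, then queries each name and keeps the minimum matching index; same result, different traversal.

-- shared inner helper `norm` (textually identical in A and in B)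
def pyNorm (s : String) : String :=
  let s0 := if s = "" then "" else s   -- (s or "")
  PySem.Str.replace (PySem.Str.replace (PySem.Str.replace (PySem.Str.replace
    (PySem.Str.replace (PySem.Str.replace
      (PySem.Str.upper (PySem.Str.strip s0)) "Á" "A") "É" "E") "Í" "I") "Ó" "O") "Ú" "U") "Ñ" "N"

-- ===== PORT A =====
def idxColLoopA (objetivos : PySem.Set String) : List (Int × String) → Option Int
  | [] => none
  | (i, c) :: t => if PySem.Set.contains objetivos (pyNorm c) then some i else idxColLoopA objetivos t

def idx_col_py (cabecera : List String) (nombres : List String) : Option Int :=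
  -- objetivos = {norm(n) for n in nombres}
  idxColLoopA (PySem.Set.ofList (nombres.map pyNorm)) (PySem.List.enumerate cabecera 0)

-- ===== PORT B =====
-- `for i, c in enumerate(cabecera): k = norm(c); if k not in first: first[k] = i`
def buildFirst : List (Int × String) → PySem.Dict String Int → PySem.Dict String Int
  | [], first => first
  | (i, c) :: t, first =>
      let k := pyNorm c
      buildFirst t (if first.contains k then first else first.insert k i)

-- `for n in nombres: j = first.get(norm(n)); if j is not None and (best is None or j < best): best = j`
def idxColLoopB (first : PySem.Dict String Int) : List String → Option Int → Option Int
  | [], best => best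
  | n :: t, best =>
      let best' : Option Int :=
        match first.get? (pyNorm n) with
        | none => best
        | some j =>
          match best with
          | none => some j
          | some b => if j < b then some j else some b
      idxColLoopB first t best'

def idx_col_py_alt (cabecera : List String) (nombres : List String) : Option Int :=
  idxColLoopB (buildFirst (PySem.List.enumerate cabecera 0) PySem.Dict.empty) nombres none

-- ===== PRECONDITION & SPEC =====
def Spec_idx_col_py (cabecera : List String) (nombres : List String) (out : Option Int) : Prop := out = idx_col_py_alt cabecera nombres
instance (cabecera : List String) (nombres : List String) (out : Option Int) : Decidable (Spec_idx_col_py cabecera nombres out) := by unfold Spec_idx_col_py; infer_instance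

-- ===== CLAIM (what is proved, stated in full; the proofs are below) =====
def Claim_equal_idx_col_py : Prop := ∀ (cabecera : List String) (nombres : List String), Dom_idx_col_py cabecera nombres → Spec_idx_col_py cabecera nombres (idx_col_py cabecera nombres)

-- ===== LEMMAS AND PROOFS =====

-- option-valued minimum (none = no candidate yet)
def optMin : Option Nat → Option Nat → Option Nat
  | none, b => b
  | some a, none => some a
  | some a, some b => some (min a b)

-- cast an optional Nat index to the ports' Option Int
def castO (b : Option Nat) : Option Int := b.map (fun j => (j : Int))

@[simp] theorem castO_none : castO none = none := rfl
@[simp] theorem castO_some (a : Nat) : castO (some a) = some ((a : Int)) := rfl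

@[simp] theorem optMin_none_left (b : Option Nat) : optMin none b = b := rfl
@[simp] theorem optMin_none_right (a : Option Nat) : optMin a none = a := by cases a <;> rfl

theorem optMin_zero_left (x : Option Nat) : optMin (some 0) x = some 0 := by
  cases x <;> simp [optMin]

theorem optMin_zero_right (x : Option Nat) : optMin x (some 0) = some 0 := by
  cases x <;> simp [optMin]

theorem optMin_min_left (j a : Nat) (x : Option Nat) :
    optMin (some (min j a)) x = optMin (some a) (optMin (some j) x) := by
  cases x <;> simp [optMin] <;> omega

theorem optMin_map_succ (x y : Option Nat) :
    optMin (x.map (fun i => i + 1)) (y.map (fun i => i + 1)) = (optMin x y).map (fun i => i + 1) := by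
  cases x <;> cases y <;> simp [optMin, Nat.succ_min_succ]

-- minimum, over the names, of the first-occurrence index of each matched normalized name
def minIdx (hs : List String) : List String → Option Nat
  | [] => none
  | n :: t => optMin (PySem.List.index? hs (pyNorm n)) (minIdx hs t)

theorem minIdx_nil (ns : List String) : minIdx [] ns = none := by
  induction ns with
  | nil => rfl
  | cons n t ih => simp [minIdx, ih]

theorem minIdx_cons_mem {h : String} (t : List String) {ns : List String}
    (hm : h ∈ ns.map pyNorm) : minIdx (h :: t) ns = some 0 := by
  induction ns with
  | nil => simp at hm
  | cons n ns' ih =>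
      simp only [List.map_cons, List.mem_cons] at hm
      rcases hm with hm | hm
      · rw [minIdx, hm, PySem.List.index?_cons_self, optMin_zero_left]
      · rw [minIdx, ih hm, optMin_zero_right]

theorem minIdx_cons_not_mem {h : String} (t : List String) {ns : List String}
    (hm : h ∉ ns.map pyNorm) : minIdx (h :: t) ns = (minIdx t ns).map (fun i => i + 1) := by
  induction ns with
  | nil => rfl
  | cons n ns' ih =>
      simp only [List.map_cons, List.mem_cons, not_or] at hm
      rw [minIdx, minIdx, PySem.List.index?_cons_of_ne t hm.1, ih hm.2, optMin_map_succ]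

-- core: the minimum over names of first-occurrence indices is the first matching column
theorem minIdx_eq_findIdx? (ns : List String) (hs : List String) :
    minIdx hs ns = List.findIdx? (fun h => decide (h ∈ ns.map pyNorm)) hs := by
  induction hs with
  | nil => simp [minIdx_nil]
  | cons h t ih =>
      by_cases hm : h ∈ ns.map pyNorm
      · rw [minIdx_cons_mem t hm, List.findIdx?_cons]
        simp [hm]
      · rw [minIdx_cons_not_mem t hm, List.findIdx?_cons, ih]
        simp [hm]

-- the built dict is exactly "first occurrence index in the normalized headers"
theorem buildFirst_get? (k : String) (cs : List String) (s : Int) (d : PySem.Dict String Int) :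
    (buildFirst (PySem.List.enumerate cs s) d).get? k =
      (match d.get? k with
       | some v => some v
       | none => (PySem.List.index? (cs.map pyNorm) k).map (fun j : Nat => s + (j : Int))) := by
  induction cs generalizing s d with
  | nil =>
      cases hdk : d.get? k <;> simp [buildFirst, hdk, PySem.List.index?_eq_idxOf?]
  | cons c t ih =>
      rw [PySem.List.enumerate_cons]
      simp only [buildFirst, List.map_cons]
      by_cases hcont : d.contains (pyNorm c) = true
      · rw [if_pos hcont, ih (s + 1) d]
        by_cases hk : k = pyNorm c
        · subst hk
          rw [PySem.Dict.contains_eq_isSome_get? d (pyNorm c)] at hcont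
          rcases Option.isSome_iff_exists.mp hcont with ⟨v, hv⟩
          simp [hv]
        · rw [PySem.List.index?_cons_of_ne _ (fun e => hk e.symm)]
          cases d.get? k
          · cases PySem.List.index? (t.map pyNorm) k <;> simp
            omega
          · simp
      · rw [if_neg hcont, ih (s + 1) (d.insert (pyNorm c) s)]
        by_cases hk : k = pyNorm c
        · subst hk
          have hdk : d.get? (pyNorm c) = none := by
            rw [PySem.Dict.contains_eq_isSome_get? d (pyNorm c)] at hcont
            exact Option.eq_none_iff_forall_ne_some.mpr
              (fun v hv => hcont (by simp [hv]))
          rw [PySem.Dict.get?_insert_self, hdk, PySem.List.index?_cons_self]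
          simp
        · rw [PySem.Dict.get?_insert_of_ne d s hk,
            PySem.List.index?_cons_of_ne _ (fun e => hk e.symm)]
          cases d.get? k
          · cases PySem.List.index? (t.map pyNorm) k <;> simp
            omega
          · simp

-- B's loop computes minIdx (accumulator generalized; Nat indices cast to Int)
theorem idxColLoopB_eq (first : PySem.Dict String Int) (hs : List String)
    (hf : ∀ m, first.get? m = castO (PySem.List.index? hs m))
    (ns : List String) (b : Option Nat) :
    idxColLoopB first ns (castO b) = castO (optMin b (minIdx hs ns)) := by
  induction ns generalizing b with
  | nil => cases b <;> rfl
  | cons n t ih =>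
      simp only [idxColLoopB, minIdx, hf (pyNorm n)]
      cases hidx : PySem.List.index? hs (pyNorm n) with
      | none =>
          rw [optMin_none_left]
          exact ih b
      | some j =>
          cases b with
          | none =>
              rw [optMin_none_left]
              calc idxColLoopB first t (some ((j : Int)))
                  = idxColLoopB first t (castO (some j)) := rfl
                _ = castO (optMin (some j) (minIdx hs t)) := ih (some j)
          | some a =>
              have hacc : (if ((j : Nat) : Int) < ((a : Nat) : Int) then some ((j : Int)) else some ((a : Int)))
                  = castO (some (min j a)) := by
                split_ifs with hlt
                · simp [min_eq_left (le_of_lt (by exact_mod_cast hlt))]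
                · simp [min_eq_right (by exact_mod_cast not_lt.mp hlt)]
              calc idxColLoopB first t (if ((j : Int)) < ((a : Int)) then some ((j : Int)) else some ((a : Int)))
                  = idxColLoopB first t (castO (some (min j a))) := by rw [hacc]
                _ = castO (optMin (some (min j a)) (minIdx hs t)) := ih (some (min j a))
                _ = castO (optMin (some a) (optMin (some j) (minIdx hs t))) := by rw [optMin_min_left]

-- A's loop is findIdx? over the headers (start index generalized)
theorem idxColLoopA_eq (obj : PySem.Set String) (cs : List String) (s : Int) :
    idxColLoopA obj (PySem.List.enumerate cs s) =
      (List.findIdx? (fun c => PySem.Set.contains obj (pyNorm c)) cs).map (fun j : Nat => s + (j : Int)) := by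
  induction cs generalizing s with
  | nil => rfl
  | cons c t ih =>
      rw [PySem.List.enumerate_cons]
      simp only [idxColLoopA, List.findIdx?_cons]
      cases hc : PySem.Set.contains obj (pyNorm c) with
      | true => simp
      | false =>
          simp only [Bool.false_eq_true, if_false]
          rw [ih (s + 1), Option.map_map]
          cases List.findIdx? (fun c => PySem.Set.contains obj (pyNorm c)) t with
          | none => rfl
          | some k => simp; ring

-- ===== VERDICT (by name: the statement is the Claim_ definition above) =====
theorem idx_col_py_spec : Claim_equal_idx_col_py := by
  intro cabecera nombres _
  unfold Spec_idx_col_py idx_col_py idx_col_py_alt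
  have hf : ∀ m, (buildFirst (PySem.List.enumerate cabecera 0) PySem.Dict.empty).get? m
      = castO (PySem.List.index? (cabecera.map pyNorm) m) := by
    intro m
    rw [buildFirst_get? m cabecera 0 PySem.Dict.empty, PySem.Dict.get?_empty]
    cases PySem.List.index? (cabecera.map pyNorm) m <;> simp [castO]
  have hB := idxColLoopB_eq (buildFirst (PySem.List.enumerate cabecera 0) PySem.Dict.empty)
    (cabecera.map pyNorm) hf nombres none
  rw [castO_none, optMin_none_left] at hB
  rw [hB, minIdx_eq_findIdx? nombres (cabecera.map pyNorm), idxColLoopA_eq, List.findIdx?_map]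
  have hp : (fun c => PySem.Set.contains (PySem.Set.ofList (nombres.map pyNorm)) (pyNorm c))
      = ((fun h => decide (h ∈ nombres.map pyNorm)) ∘ pyNorm) := by
    funext c
    simp [Function.comp, PySem.Set.contains_eq_listContains, PySem.Set.mem_ofList]
  rw [hp]
  cases List.findIdx? ((fun h => decide (h ∈ nombres.map pyNorm)) ∘ pyNorm) cabecera with
  | none => rfl
  | some k => simp [castO]
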